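-- pv_equiv track=rewrite | github.com/codeflash-ai/codeflash | code_to_optimize/crosshair_tests.py | find_common_tags3
-- ===== SOURCE A (Python) =====
-- def find_common_tags3(articles: list[dict[str, list[str]]]) -> set[str]:
--     if not articles:
--         return set()
--
--     common_tags = set(articles[0]["tags"])
--     for article in articles[1:]:
--         common_tags.intersection_update(article["tags"])
--         if not common_tags:
--             break
--     return common_tags
-- ===== SOURCE B (Python) =====
-- def find_common_tags3(articles: list[dict[str, list[str]]]) -> set[str]:
--     if not articles:
--         return set()
--     counts = {}
--     for article in articles:
--         for tag in set(article["tags"]):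
--             counts[tag] = counts.get(tag, 0) + 1
--     n = len(articles)
--     return {tag for tag, c in counts.items() if c == n}
-- ===== Notes on version B (the rewrite author's own statement) =====
-- stated objective: alternative
-- what changed: B replaces A's progressive set-intersection with early exit by a single counting pass building a tag-frequency dict (deduplicated per article) followed by one selecting pass keeping tags whose count equals the number of articles.
-- outside the precondition, e.g. on find_common_tags3([{'title': ['x']}]): A raises KeyError, B raises KeyError
import Mathlib
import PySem

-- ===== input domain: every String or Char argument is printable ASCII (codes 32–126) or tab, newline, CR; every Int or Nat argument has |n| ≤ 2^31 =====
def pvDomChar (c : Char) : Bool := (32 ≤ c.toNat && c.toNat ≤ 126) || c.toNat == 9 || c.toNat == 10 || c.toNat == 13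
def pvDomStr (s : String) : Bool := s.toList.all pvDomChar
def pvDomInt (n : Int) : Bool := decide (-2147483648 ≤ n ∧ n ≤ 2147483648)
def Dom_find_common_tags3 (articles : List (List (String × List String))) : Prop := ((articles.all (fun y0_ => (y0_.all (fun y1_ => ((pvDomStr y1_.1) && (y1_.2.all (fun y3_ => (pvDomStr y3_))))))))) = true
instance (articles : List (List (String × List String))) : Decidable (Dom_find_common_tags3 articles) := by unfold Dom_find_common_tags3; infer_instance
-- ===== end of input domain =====

-- B replaces A's progressive set-intersection loop by one counting pass (a dict of
-- per-article tag frequencies) plus a final selection of tags counted in every article;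
-- objective: alternative decomposition, same exact result.

-- article["tags"]  (Pre_ guarantees the key is present; [] is never reached inside Pre_)
def pvTags (a : List (String × List String)) : List String :=
  (PySem.Dict.mk a).getD "tags" []

-- ===== PORT A =====
-- the for-loop over articles[1:], with the early 'break' when the set becomes empty
def pvLoopA (common : List String) : List (List (String × List String)) → List String
  | [] => common
  | a :: rest =>
    let c := common.filter (fun t => (pvTags a).contains t)
    if c = [] then c else pvLoopA c rest

def find_common_tags3 (articles : List (List (String × List String))) : List String :=
  match articles with
  | [] => []
  | a0 :: rest => pvLoopA (PySem.Set.ofList (pvTags a0)) rest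

-- ===== PORT B =====
def find_common_tags3_alt (articles : List (List (String × List String))) : List String :=
  if articles = [] then []
  else
    let counts : PySem.Dict String Int :=
      articles.foldl
        (fun d a => (PySem.Set.ofList (pvTags a)).foldl
          (fun d t => d.insert t (d.getD t 0 + 1)) d)
        PySem.Dict.empty
    let n : Int := articles.length
    PySem.Set.ofList ((counts.items.filter (fun p => p.2 == n)).map (fun p => p.1))

-- ===== PRECONDITION & SPEC =====
-- Pre_ excludes exactly the inputs where Python A raises KeyError: an article without a "tags" key.
def Pre_find_common_tags3 (articles : List (List (String × List String))) : Prop :=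
  articles.all (fun a => (PySem.Dict.mk a).contains "tags") = true
instance (articles : List (List (String × List String))) : Decidable (Pre_find_common_tags3 articles) := by unfold Pre_find_common_tags3; infer_instance

def pvWitness_find_common_tags3 : (List (List (String × List String))) :=
  [[("tags", ["a", "b"])], [("tags", ["b", "c"])]]

def Spec_find_common_tags3 (articles : List (List (String × List String))) (out : List String) : Prop := out = find_common_tags3_alt articles
instance (articles : List (List (String × List String))) (out : List String) : Decidable (Spec_find_common_tags3 articles out) := by unfold Spec_find_common_tags3; infer_instance

-- ===== CLAIM (what is proved, stated in full; the proofs are below) =====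
def Claim_equal_find_common_tags3 : Prop := ∀ (articles : List (List (String × List String))), Dom_find_common_tags3 articles → Pre_find_common_tags3 articles → Spec_find_common_tags3 articles (find_common_tags3 articles)

-- ===== LEMMAS AND PROOFS =====

-- A's loop is the filter of the accumulator by membership in every remaining article
theorem pvLoopA_eq (rest : List (List (String × List String))) :
    ∀ common : List String,
      pvLoopA common rest
        = common.filter (fun t => rest.all (fun a => (pvTags a).contains t)) := by
  induction rest with
  | nil => intro common; simp [pvLoopA]
  | cons a rest ih =>
    intro common
    have hsplit :
        common.filter (fun t => (a :: rest).all (fun b => (pvTags b).contains t))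
          = (common.filter (fun t => (pvTags a).contains t)).filter
              (fun t => rest.all (fun b => (pvTags b).contains t)) := by
      rw [List.filter_filter]
      apply List.filter_congr
      intro t _
      simp [Bool.and_comm]
    rw [hsplit]
    show (if common.filter (fun t => (pvTags a).contains t) = []
          then common.filter (fun t => (pvTags a).contains t)
          else pvLoopA (common.filter (fun t => (pvTags a).contains t)) rest) = _
    by_cases h : common.filter (fun t => (pvTags a).contains t) = []
    · rw [if_pos h, h, List.filter_nil]
    · rw [if_neg h, ih]

-- count of a tag across the flattened per-article deduplicated tag lists = number of articles containing it
theorem pvCountFlat (t : String) (l : List (List (String × List String))) :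
    ((l.map (fun a => PySem.Set.ofList (pvTags a))).flatten).count t
      = l.countP (fun a => (pvTags a).contains t) := by
  rw [List.count_flatten, List.map_map]
  have hmap :
      l.map ((fun x => x.count t) ∘ fun a => PySem.Set.ofList (pvTags a))
        = l.map (fun a => if (pvTags a).contains t then 1 else 0) := by
    apply List.map_congr_left
    intro a _
    by_cases hmem : t ∈ pvTags a
    · simp [hmem]
    · have h1 : t ∉ PySem.Set.ofList (pvTags a) := fun h => hmem ((PySem.Set.mem_ofList _ _).mp h)
      simp [List.count_eq_zero.mpr h1, hmem]
  rw [hmap, PySem.List.sum_map_ite_one_zero_nat]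

-- updating a set with more elements does not change its filter by a predicate that only holds inside the set
theorem pvFilterUpdate (p : String → Bool) (ys : List String) :
    ∀ s : List String, (∀ k, p k = true → k ∈ s) →
      (PySem.Set.update s ys).filter p = s.filter p := by
  induction ys with
  | nil => intro s _; rfl
  | cons y ys ih =>
    intro s hs
    show (PySem.Set.update (PySem.Set.add s y) ys).filter p = s.filter p
    by_cases hy : y ∈ s
    · have : PySem.Set.add s y = s := by simp [PySem.Set.add, PySem.Set.contains, hy]
      rw [this, ih s hs]
    · have hadd : PySem.Set.add s y = s ++ [y] := by
        simp [PySem.Set.add, PySem.Set.contains, hy]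
      have hpy : p y = false := by
        cases hpy : p y with
        | false => rfl
        | true => exact absurd (hs y hpy) hy
      rw [hadd, ih (s ++ [y]) (fun k hk => List.mem_append_left _ (hs k hk))]
      simp [List.filter_append, hpy]

theorem pvOfListAppend (xs ys : List String) :
    PySem.Set.ofList (xs ++ ys) = PySem.Set.update (PySem.Set.ofList xs) ys := by
  simp [PySem.Set.ofList_eq_foldl, PySem.Set.update, List.foldl_append]

-- ===== VERDICT (by name: the statement is the Claim_ definition above) =====
theorem find_common_tags3_spec : Claim_equal_find_common_tags3 := by
  intro articles _ _
  unfold Spec_find_common_tags3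
  match articles with
  | [] => rfl
  | a0 :: rest =>
    set S0 : List String := PySem.Set.ofList (pvTags a0) with hS0
    set L : List String :=
      (((a0 :: rest).map (fun a => PySem.Set.ofList (pvTags a))).flatten) with hL
    set pB : String → Bool :=
      fun k => ((L.count k : Int) == (((a0 :: rest).length : Nat) : Int)) with hpB
    -- B's counting loop is Counter(L)
    have hcounts :
        (a0 :: rest).foldl
            (fun d a => (PySem.Set.ofList (pvTags a)).foldl
              (fun d t => d.insert t (d.getD t 0 + 1)) d)
            PySem.Dict.empty
          = PySem.Dict.counter L := by
      rw [← PySem.Dict.foldl_insert_getD_add_one_eq_counter, hL, List.foldl_flatten,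
        List.foldl_map]
    -- B as a filter of Set.ofList L
    have hB :
        find_common_tags3_alt (a0 :: rest)
          = PySem.Set.ofList ((PySem.Set.ofList L).filter pB) := by
      show PySem.Set.ofList _ = _
      rw [hcounts, PySem.Dict.items_counter, List.filter_map, List.map_map]
      congr 1
      simp [Function.comp_def, hpB]
    have hnodupS0 : S0.Nodup := hS0 ▸ PySem.Set.nodup_ofList _
    have hnodupFiltered : ((PySem.Set.ofList L).filter pB).Nodup :=
      (PySem.Set.nodup_ofList _).filter _
    rw [hB, PySem.Set.ofList_eq_self_of_nodup _ hnodupFiltered]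
    set R : List String :=
      ((rest.map (fun a => PySem.Set.ofList (pvTags a))).flatten) with hR
    have hLsplit : L = S0 ++ R := by simp [hL, hS0, hR]
    have hcountR : ∀ t, R.count t = rest.countP (fun a => (pvTags a).contains t) := by
      intro t; rw [hR, pvCountFlat]
    -- the selecting predicate only holds inside S0
    have hinS0 : ∀ k, pB k = true → k ∈ S0 := by
      intro k hk
      by_contra hnot
      have h0 : S0.count k = 0 := List.count_eq_zero.mpr hnot
      have hcnt : L.count k = R.count k := by rw [hLsplit, List.count_append, h0]; omega
      have hle : R.count k ≤ rest.length := by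
        rw [hcountR k]; exact List.countP_le_length
      have hk' : L.count k = (a0 :: rest).length := by
        simp only [hpB, beq_iff_eq] at hk
        exact_mod_cast hk
      simp only [List.length_cons] at hk'
      omega
    have hofL : PySem.Set.ofList L = PySem.Set.update S0 R := by
      rw [hLsplit, pvOfListAppend, PySem.Set.ofList_eq_self_of_nodup S0 hnodupS0]
    rw [hofL, pvFilterUpdate pB R S0 hinS0]
    -- A's side
    rw [show find_common_tags3 (a0 :: rest) = pvLoopA S0 rest from rfl, pvLoopA_eq]
    -- pointwise agreement of the two filter predicates on S0
    apply List.filter_congr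
    intro t ht
    have hc1 : S0.count t = 1 := List.count_eq_one_of_mem hnodupS0 ht
    have hcntL : L.count t = 1 + rest.countP (fun a => (pvTags a).contains t) := by
      rw [hLsplit, List.count_append, hc1, hcountR]
    have hiff :
        (rest.all (fun a => (pvTags a).contains t) = true) ↔ (pB t = true) := by
      rw [List.all_eq_true]
      simp only [hpB, beq_iff_eq, List.length_cons]
      constructor
      · intro hall
        have hcp : rest.countP (fun a => (pvTags a).contains t) = rest.length :=
          List.countP_eq_length.mpr hall
        rw [hcntL, hcp]; push_cast; ring
      · intro hk
        have hk' : L.count t = rest.length + 1 := by exact_mod_cast hk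
        apply List.countP_eq_length.mp
        omega
    cases hall : rest.all (fun a => (pvTags a).contains t) with
    | true => exact ((hiff.mp hall)).symm
    | false =>
      cases hk : pB t with
      | false => rfl
      | true => rw [hiff.mpr hk] at hall; exact absurd hall (by simp)
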